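-- pv_equiv track=rewrite | github.com/LukasJSvedberg/Rubix_Project_Repository | Board.py | check_position_3
-- ===== SOURCE A (Python) =====
-- import copy
--
-- def check_position_3(move_sequence, array_of_moves, numb):
--     parity_numb = 0
--     array_of_moves_copy = copy.copy(array_of_moves)
--     for element in move_sequence:
--         if element[0] == 'L':
--             if element == 'L':
--
--                 array_of_moves_copy[8][3], array_of_moves_copy[9][3], array_of_moves_copy[11][3], array_of_moves_copy[10][3] = 1 - array_of_moves_copy[10][3], 1 - array_of_moves_copy[8][3], 1 - array_of_moves_copy[9][3], 1 - array_of_moves_copy[11][3]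
--                 array_of_moves_copy[3][3], array_of_moves_copy[1][3], array_of_moves_copy[0][3], array_of_moves_copy[2][3] = 1 - array_of_moves_copy[2][3], 1 - array_of_moves_copy[3][3], 1 - array_of_moves_copy[1][3], 1 - array_of_moves_copy[0][3]
--
--             else:
--                 array_of_moves_copy[8][3], array_of_moves_copy[9][3], array_of_moves_copy[11][3], array_of_moves_copy[10][3] = 1 - array_of_moves_copy[9][3], 1 - array_of_moves_copy[11][3], 1 - array_of_moves_copy[10][3], 1 - array_of_moves_copy[8][3],
--                 array_of_moves_copy[3][3], array_of_moves_copy[1][3], array_of_moves_copy[0][3], array_of_moves_copy[2][3] = 1 - array_of_moves_copy[1][3], 1 - array_of_moves_copy[0][3], 1 - array_of_moves_copy[2][3], 1 - array_of_moves_copy[3][3]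
--
--         elif element[0] == 'R':
--             if element == 'R':
--                 array_of_moves_copy[16][3], array_of_moves_copy[17][3], array_of_moves_copy[19][3], array_of_moves_copy[18][3] = 1 - array_of_moves_copy[17][3], 1 - array_of_moves_copy[19][3], 1 - array_of_moves_copy[18][3], 1 - array_of_moves_copy[16][3]
--                 array_of_moves_copy[7][3], array_of_moves_copy[6][3], array_of_moves_copy[4][3], array_of_moves_copy[5][3] = 1 - array_of_moves_copy[5][3], 1 - array_of_moves_copy[7][3], 1 - array_of_moves_copy[6][3], 1 - array_of_moves_copy[4][3]
--
--             else:
--                 array_of_moves_copy[16][3], array_of_moves_copy[17][3], array_of_moves_copy[19][3], array_of_moves_copy[18][3] = 1 - array_of_moves_copy[18][3], 1 - array_of_moves_copy[16][3], 1 - array_of_moves_copy[17][3], 1 - array_of_moves_copy[19][3]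
--                 array_of_moves_copy[7][3], array_of_moves_copy[6][3], array_of_moves_copy[4][3], array_of_moves_copy[5][3] = 1 - array_of_moves_copy[6][3], 1 - array_of_moves_copy[4][3], 1 - array_of_moves_copy[5][3], 1 - array_of_moves_copy[7][3]
--
--         elif element == 'U2':
--             array_of_moves_copy[11][3], array_of_moves_copy[14][3], array_of_moves_copy[19][3], array_of_moves_copy[15][3] = array_of_moves_copy[19][3], array_of_moves_copy[15][3], array_of_moves_copy[11][3], array_of_moves_copy[14][3]
--             array_of_moves_copy[7][3], array_of_moves_copy[6][3], array_of_moves_copy[2][3], array_of_moves_copy[3][3] = array_of_moves_copy[2][3], array_of_moves_copy[3][3], array_of_moves_copy[7][3], array_of_moves_copy[6][3]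
--
--         elif element == 'D2':
--             array_of_moves_copy[8][3], array_of_moves_copy[12][3], array_of_moves_copy[16][3], array_of_moves_copy[13][3] = array_of_moves_copy[16][3], array_of_moves_copy[13][3], array_of_moves_copy[8][3], array_of_moves_copy[12][3]
--             array_of_moves_copy[5][3], array_of_moves_copy[4][3], array_of_moves_copy[0][3], array_of_moves_copy[1][3] = array_of_moves_copy[0][3], array_of_moves_copy[1][3], array_of_moves_copy[5][3], array_of_moves_copy[4][3]
--
--         elif element == 'F2':
--             array_of_moves_copy[10][3], array_of_moves_copy[13][3], array_of_moves_copy[18][3], array_of_moves_copy[15][3] = array_of_moves_copy[18][3], array_of_moves_copy[15][3], array_of_moves_copy[10][3], array_of_moves_copy[13][3]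
--             array_of_moves_copy[1][3], array_of_moves_copy[3][3], array_of_moves_copy[7][3], array_of_moves_copy[5][3] = array_of_moves_copy[7][3], array_of_moves_copy[5][3], array_of_moves_copy[1][3], array_of_moves_copy[3][3]
--
--         elif element == 'B2':
--             array_of_moves_copy[9][3], array_of_moves_copy[12][3], array_of_moves_copy[17][3], array_of_moves_copy[14][3] = array_of_moves_copy[17][3], array_of_moves_copy[14][3], array_of_moves_copy[9][3], array_of_moves_copy[12][3]
--             array_of_moves_copy[0][3], array_of_moves_copy[2][3], array_of_moves_copy[6][3], array_of_moves_copy[4][3] = array_of_moves_copy[6][3], array_of_moves_copy[4][3], array_of_moves_copy[0][3], array_of_moves_copy[2][3]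
--
--     for x, element in enumerate(array_of_moves_copy):
--         parity_numb += element[3] * (2 ** (19 - x))
--     return move_sequence, parity_numb
-- ===== SOURCE B (Python) =====
-- # B: composes the whole move sequence into ONE permutation sigma + flip vector
-- # (a fold over moves building a single affine map on 20 positions), then computes
-- # the parity in one pass reading each position's bit through the composed map --
-- # no intermediate cube states are materialized. A mutates array_of_moves' inner
-- # lists in place; B does not: equivalence is about the return value only.
--
-- _MOVES = {
--     'L':  ([(8, 10), (9, 8), (11, 9), (10, 11), (3, 2), (1, 3), (0, 1), (2, 0)], True),
--     'Lp': ([(8, 9), (9, 11), (11, 10), (10, 8), (3, 1), (1, 0), (0, 2), (2, 3)], True),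
--     'R':  ([(16, 17), (17, 19), (19, 18), (18, 16), (7, 5), (6, 7), (4, 6), (5, 4)], True),
--     'Rp': ([(16, 18), (17, 16), (19, 17), (18, 19), (7, 6), (6, 4), (4, 5), (5, 7)], True),
--     'U2': ([(11, 19), (14, 15), (19, 11), (15, 14), (7, 2), (6, 3), (2, 7), (3, 6)], False),
--     'D2': ([(8, 16), (12, 13), (16, 8), (13, 12), (5, 0), (4, 1), (0, 5), (1, 4)], False),
--     'F2': ([(10, 18), (13, 15), (18, 10), (15, 13), (1, 7), (3, 5), (7, 1), (5, 3)], False),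
--     'B2': ([(9, 17), (12, 14), (17, 9), (14, 12), (0, 6), (2, 4), (6, 0), (4, 2)], False),
-- }
--
--
-- def check_position_3(move_sequence, array_of_moves, numb):
--     sigma = list(range(20))
--     flips = [False] * 20
--     for m in move_sequence:
--         if m[0] == 'L':
--             key = 'L' if m == 'L' else 'Lp'
--         elif m[0] == 'R':
--             key = 'R' if m == 'R' else 'Rp'
--         elif m in ('U2', 'D2', 'F2', 'B2'):
--             key = m
--         else:
--             continue
--         pairs, flip = _MOVES[key]
--         src = dict(pairs)
--         sigma = [sigma[src.get(d, d)] for d in range(20)]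
--         flips = [(flip if d in src else False) ^ flips[src.get(d, d)] for d in range(20)]
--     parity_numb = 0
--     for i, row in enumerate(array_of_moves):
--         b = array_of_moves[sigma[i]][3]
--         if flips[i]:
--             b = 1 - b
--         parity_numb += b * 2 ** (19 - i)
--     return move_sequence, parity_numb
-- ===== Notes on version B (the rewrite author's own statement) =====
-- stated objective: alternative
-- what changed: Instead of simulating the cube state move by move, B folds the whole move sequence into a single composed permutation sigma plus a flip vector on the 20 positions and then computes the parity in one pass reading each row's bit through that composed map, never materializing intermediate states; B does not mutate array_of_moves (return-value equivalence).
import Mathlib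
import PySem

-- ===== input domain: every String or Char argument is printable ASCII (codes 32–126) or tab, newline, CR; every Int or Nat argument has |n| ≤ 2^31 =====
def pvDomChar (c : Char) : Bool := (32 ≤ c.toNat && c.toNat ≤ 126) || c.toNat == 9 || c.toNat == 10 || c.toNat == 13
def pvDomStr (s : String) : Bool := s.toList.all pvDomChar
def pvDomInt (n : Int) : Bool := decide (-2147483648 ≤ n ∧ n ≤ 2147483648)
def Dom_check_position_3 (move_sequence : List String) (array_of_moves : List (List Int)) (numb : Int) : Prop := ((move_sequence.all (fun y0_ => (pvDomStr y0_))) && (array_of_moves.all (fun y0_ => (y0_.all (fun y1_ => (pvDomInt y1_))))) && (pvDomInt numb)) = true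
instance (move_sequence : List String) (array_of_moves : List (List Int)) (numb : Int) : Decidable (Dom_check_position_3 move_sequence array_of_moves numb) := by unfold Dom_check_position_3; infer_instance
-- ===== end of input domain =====

-- B replaces A's move-by-move state simulation by composing the whole move sequence
-- into a single permutation sigma + flip vector over the 20 positions, applied once
-- while summing the parity; no intermediate states are materialized.
-- A mutates array_of_moves' inner lists in place (shallow copy); B does not: the
-- equivalence proved here is about the RETURN value only.


-- ===== PORT A =====
-- array_of_moves_copy[i][3] (indices are in range under Pre_; getD's defaults are unreachable there)
def pvG (a : List (List Int)) (i : Nat) : Int := (a.getD i []).getD 3 0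
-- array_of_moves_copy[i][3] = v
def pvSt : List (List Int) → Nat → Int → List (List Int)
  | [], _, _ => []
  | r :: t, 0, v => r.set 3 v :: t
  | r :: t, i + 1, v => r :: pvSt t i v
-- one simultaneous 4-target assignment: RHS values are given already evaluated, then written left to right
def pvSt4 (a : List (List Int)) (i1 : Nat) (v1 : Int) (i2 : Nat) (v2 : Int)
    (i3 : Nat) (v3 : Int) (i4 : Nat) (v4 : Int) : List (List Int) :=
  pvSt (pvSt (pvSt (pvSt a i1 v1) i2 v2) i3 v3) i4 v4

-- the body of A's for-loop over move_sequence
def pvAStep (a : List (List Int)) (element : String) : List (List Int) :=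
  if PySem.Str.pyGet? element 0 = some 'L' then
    if element = "L" then
      let a1 := pvSt4 a 8 (1 - pvG a 10) 9 (1 - pvG a 8) 11 (1 - pvG a 9) 10 (1 - pvG a 11)
      pvSt4 a1 3 (1 - pvG a1 2) 1 (1 - pvG a1 3) 0 (1 - pvG a1 1) 2 (1 - pvG a1 0)
    else
      let a1 := pvSt4 a 8 (1 - pvG a 9) 9 (1 - pvG a 11) 11 (1 - pvG a 10) 10 (1 - pvG a 8)
      pvSt4 a1 3 (1 - pvG a1 1) 1 (1 - pvG a1 0) 0 (1 - pvG a1 2) 2 (1 - pvG a1 3)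
  else if PySem.Str.pyGet? element 0 = some 'R' then
    if element = "R" then
      let a1 := pvSt4 a 16 (1 - pvG a 17) 17 (1 - pvG a 19) 19 (1 - pvG a 18) 18 (1 - pvG a 16)
      pvSt4 a1 7 (1 - pvG a1 5) 6 (1 - pvG a1 7) 4 (1 - pvG a1 6) 5 (1 - pvG a1 4)
    else
      let a1 := pvSt4 a 16 (1 - pvG a 18) 17 (1 - pvG a 16) 19 (1 - pvG a 17) 18 (1 - pvG a 19)
      pvSt4 a1 7 (1 - pvG a1 6) 6 (1 - pvG a1 4) 4 (1 - pvG a1 5) 5 (1 - pvG a1 7)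
  else if element = "U2" then
    let a1 := pvSt4 a 11 (pvG a 19) 14 (pvG a 15) 19 (pvG a 11) 15 (pvG a 14)
    pvSt4 a1 7 (pvG a1 2) 6 (pvG a1 3) 2 (pvG a1 7) 3 (pvG a1 6)
  else if element = "D2" then
    let a1 := pvSt4 a 8 (pvG a 16) 12 (pvG a 13) 16 (pvG a 8) 13 (pvG a 12)
    pvSt4 a1 5 (pvG a1 0) 4 (pvG a1 1) 0 (pvG a1 5) 1 (pvG a1 4)
  else if element = "F2" then
    let a1 := pvSt4 a 10 (pvG a 18) 13 (pvG a 15) 18 (pvG a 10) 15 (pvG a 13)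
    pvSt4 a1 1 (pvG a1 7) 3 (pvG a1 5) 7 (pvG a1 1) 5 (pvG a1 3)
  else if element = "B2" then
    let a1 := pvSt4 a 9 (pvG a 17) 12 (pvG a 14) 17 (pvG a 9) 14 (pvG a 12)
    pvSt4 a1 0 (pvG a1 6) 2 (pvG a1 4) 6 (pvG a1 0) 4 (pvG a1 2)
  else a

-- A's final loop: for x, element in enumerate(...): parity_numb += element[3] * 2**(19-x)
-- (under Pre_ the list has at most 20 rows, so 19 - x never truncates)
def pvParA (acc : Int) (x : Nat) : List (List Int) → Int
  | [] => acc
  | e :: rest => pvParA (acc + (e.getD 3 0) * 2 ^ (19 - x)) (x + 1) rest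

def check_position_3 (move_sequence : List String) (array_of_moves : List (List Int)) (numb : Int) : List String × Int :=
  let a := move_sequence.foldl pvAStep array_of_moves
  (move_sequence, pvParA 0 0 a)

-- ===== PORT B =====
-- Source B's _MOVES lookup: (dst, src) pairs plus flip flag
def pvTable (k : String) : List (Nat × Nat) × Bool :=
  if k = "L" then ([(8,10),(9,8),(11,9),(10,11),(3,2),(1,3),(0,1),(2,0)], true)
  else if k = "Lp" then ([(8,9),(9,11),(11,10),(10,8),(3,1),(1,0),(0,2),(2,3)], true)
  else if k = "R" then ([(16,17),(17,19),(19,18),(18,16),(7,5),(6,7),(4,6),(5,4)], true)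
  else if k = "Rp" then ([(16,18),(17,16),(19,17),(18,19),(7,6),(6,4),(4,5),(5,7)], true)
  else if k = "U2" then ([(11,19),(14,15),(19,11),(15,14),(7,2),(6,3),(2,7),(3,6)], false)
  else if k = "D2" then ([(8,16),(12,13),(16,8),(13,12),(5,0),(4,1),(0,5),(1,4)], false)
  else if k = "F2" then ([(10,18),(13,15),(18,10),(15,13),(1,7),(3,5),(7,1),(5,3)], false)
  else ([(9,17),(12,14),(17,9),(14,12),(0,6),(2,4),(6,0),(4,2)], false)

-- Source B's key selection (the `continue` branch is `none`)
def pvKey? (m : String) : Option String :=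
  if PySem.Str.pyGet? m 0 = some 'L' then some (if m = "L" then "L" else "Lp")
  else if PySem.Str.pyGet? m 0 = some 'R' then some (if m = "R" then "R" else "Rp")
  else if m = "U2" ∨ m = "D2" ∨ m = "F2" ∨ m = "B2" then some m
  else none

-- dict(pairs).get(d, d) and `d in src`
def pvSrcOf (pairs : List (Nat × Nat)) (d : Nat) : Nat := ((pairs.lookup d).getD d)
def pvMemOf (pairs : List (Nat × Nat)) (d : Nat) : Bool := (pairs.lookup d).isSome

-- the body of Source B's composition loop: fold a move into (sigma, flips)
def pvCompose (st : List Nat × List Bool) (m : String) : List Nat × List Bool :=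
  match pvKey? m with
  | none => st
  | some k =>
    ((List.range 20).map (fun d => st.1.getD (pvSrcOf (pvTable k).1 d) 0),
     (List.range 20).map (fun d =>
        ((if pvMemOf (pvTable k).1 d then (pvTable k).2 else false)).xor
          (st.2.getD (pvSrcOf (pvTable k).1 d) false)))

-- Source B's parity loop: for i, row in enumerate(arr): read arr[sigma[i]][3] through the map
-- (indices are in range under Pre_; getD's defaults are unreachable there)
def pvParB (arr : List (List Int)) (sigma : List Nat) (flips : List Bool)
    (acc : Int) (i : Nat) : List (List Int) → Int
  | [] => acc
  | _ :: rest =>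
      let b0 := (arr.getD (sigma.getD i 0) []).getD 3 0
      let b := if flips.getD i false then 1 - b0 else b0
      pvParB arr sigma flips (acc + b * 2 ^ (19 - i)) (i + 1) rest

def check_position_3_alt (move_sequence : List String) (array_of_moves : List (List Int)) (numb : Int) : List String × Int :=
  let st := move_sequence.foldl pvCompose (List.range 20, List.replicate 20 false)
  (move_sequence, pvParB array_of_moves st.1 st.2 0 0 array_of_moves)

-- ===== PRECONDITION & SPEC =====
-- smallest array length an effective move needs (largest index it touches + 1)
def pvReq (s : String) : Nat :=
  if PySem.Str.pyGet? s 0 = some 'L' then 12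
  else if PySem.Str.pyGet? s 0 = some 'R' then 20
  else if s = "U2" then 20
  else if s = "D2" then 17
  else if s = "F2" then 19
  else if s = "B2" then 18
  else 0

-- Exactly where A returns an int: nonempty move strings (element[0] raises on ""), every row
-- long enough for row[3], every move's indices in range, and at most 20 rows (with more rows
-- 2**(19-x) goes fractional and A returns a float, not an int).
def Pre_check_position_3 (move_sequence : List String) (array_of_moves : List (List Int)) (numb : Int) : Prop :=
  (∀ s ∈ move_sequence, s ≠ "") ∧ array_of_moves.length ≤ 20 ∧
  (∀ r ∈ array_of_moves, 4 ≤ r.length) ∧ (∀ s ∈ move_sequence, pvReq s ≤ array_of_moves.length)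
instance (move_sequence : List String) (array_of_moves : List (List Int)) (numb : Int) : Decidable (Pre_check_position_3 move_sequence array_of_moves numb) := by unfold Pre_check_position_3; infer_instance

def pvWitness_check_position_3 : List String × List (List Int) × Int :=
  (["L", "R'", "U2"],
   [[0,0,0,1],[0,0,0,0],[0,0,0,1],[0,0,0,0],[0,0,0,1],[0,0,0,0],[0,0,0,1],[0,0,0,0],
    [0,0,0,1],[0,0,0,0],[0,0,0,1],[0,0,0,0],[0,0,0,1],[0,0,0,0],[0,0,0,1],[0,0,0,0],
    [0,0,0,1],[0,0,0,0],[0,0,0,1],[0,0,0,0]], 0)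

def Spec_check_position_3 (move_sequence : List String) (array_of_moves : List (List Int)) (numb : Int) (out : List String × Int) : Prop := out = check_position_3_alt move_sequence array_of_moves numb
instance (move_sequence : List String) (array_of_moves : List (List Int)) (numb : Int) (out : List String × Int) : Decidable (Spec_check_position_3 move_sequence array_of_moves numb out) := by unfold Spec_check_position_3; infer_instance

-- ===== CLAIM (what is proved, stated in full; the proofs are below) =====
def Claim_equal_check_position_3 : Prop := ∀ (move_sequence : List String) (array_of_moves : List (List Int)) (numb : Int), Dom_check_position_3 move_sequence array_of_moves numb → Pre_check_position_3 move_sequence array_of_moves numb → Spec_check_position_3 move_sequence array_of_moves numb (check_position_3 move_sequence array_of_moves numb)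

-- ===== LEMMAS AND PROOFS =====

-- the parity column A's mutations act on and B reads through the composed map
def pvCol (a : List (List Int)) : List Int := a.map (fun r => r.getD 3 0)

-- every row has at least 4 entries (preserved by all of A's writes)
def pvRows4 (a : List (List Int)) : Prop := ∀ r ∈ a, 4 ≤ r.length

-- A's per-move effect expressed on the parity column: write the 8 cycle targets
-- from the saved old column (this is a proof-side characterization of A, not B's port)
def pvApplyPairs (pairs : List (Nat × Nat)) (flip : Bool) (bits : List Int) : List Int :=
  pairs.foldl (fun b p => b.set p.1 (if flip then 1 - bits.getD p.2 0 else bits.getD p.2 0)) bits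

def pvColStep (bits : List Int) (m : String) : List Int :=
  match pvKey? m with
  | none => bits
  | some k => pvApplyPairs (pvTable k).1 (pvTable k).2 bits

-- reading position j of bits through a composed (sigma, flips) state
def pvAct (st : List Nat × List Bool) (bits : List Int) (j : Nat) : Int :=
  if st.2.getD j false then 1 - bits.getD (st.1.getD j 0) 0 else bits.getD (st.1.getD j 0) 0

def pvApply (st : List Nat × List Bool) (bits : List Int) : List Int :=
  (List.range bits.length).map (pvAct st bits)

lemma pvG_col (a : List (List Int)) (i : Nat) : pvG a i = (pvCol a).getD i 0 := by
  induction a generalizing i with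
  | nil => simp [pvG, pvCol, List.getD]
  | cons r t ih =>
    cases i with
    | zero => simp [pvG, pvCol, List.getD]
    | succ j => simpa [pvG, pvCol, List.getD] using ih j

lemma pvRows4_pvSt (a : List (List Int)) (i : Nat) (v : Int) (h : pvRows4 a) :
    pvRows4 (pvSt a i v) := by
  induction a generalizing i with
  | nil => simpa [pvSt] using h
  | cons r t ih =>
    cases i with
    | zero =>
      intro q hq
      rcases List.mem_cons.1 hq with rfl | hq
      · simpa using h r (by simp)
      · exact h q (List.mem_cons_of_mem _ hq)
    | succ j =>
      intro q hq
      rcases List.mem_cons.1 hq with rfl | hq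
      · exact h q (by simp)
      · exact ih j (fun p hp => h p (List.mem_cons_of_mem _ hp)) q hq

lemma pvCol_pvSt (a : List (List Int)) (i : Nat) (v : Int) (h : pvRows4 a) :
    pvCol (pvSt a i v) = (pvCol a).set i v := by
  induction a generalizing i with
  | nil => simp [pvSt, pvCol]
  | cons r t ih =>
    cases i with
    | zero =>
      have h4 : 3 < r.length := by have := h r (by simp); omega
      simp [pvSt, pvCol, List.getD, h4]
    | succ j =>
      show (r.getD 3 0) :: pvCol (pvSt t j v) = (r.getD 3 0) :: (pvCol t).set j v
      rw [ih j (fun p hp => h p (List.mem_cons_of_mem _ hp))]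

lemma pvLen_pvSt (a : List (List Int)) (i : Nat) (v : Int) :
    (pvSt a i v).length = a.length := by
  induction a generalizing i with
  | nil => simp [pvSt]
  | cons r t ih =>
    cases i with
    | zero => simp [pvSt]
    | succ j => simp [pvSt, ih]

lemma pvRows4_pvSt4 (a : List (List Int)) (i1 i2 i3 i4 : Nat) (v1 v2 v3 v4 : Int)
    (h : pvRows4 a) : pvRows4 (pvSt4 a i1 v1 i2 v2 i3 v3 i4 v4) := by
  simp only [pvSt4]
  exact pvRows4_pvSt _ _ _ (pvRows4_pvSt _ _ _ (pvRows4_pvSt _ _ _ (pvRows4_pvSt _ _ _ h)))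

lemma pvCol_pvSt4 (a : List (List Int)) (i1 i2 i3 i4 : Nat) (v1 v2 v3 v4 : Int)
    (h : pvRows4 a) :
    pvCol (pvSt4 a i1 v1 i2 v2 i3 v3 i4 v4) =
      ((((pvCol a).set i1 v1).set i2 v2).set i3 v3).set i4 v4 := by
  simp only [pvSt4]
  rw [pvCol_pvSt _ _ _ (pvRows4_pvSt _ _ _ (pvRows4_pvSt _ _ _ (pvRows4_pvSt _ _ _ h))),
      pvCol_pvSt _ _ _ (pvRows4_pvSt _ _ _ (pvRows4_pvSt _ _ _ h)),
      pvCol_pvSt _ _ _ (pvRows4_pvSt _ _ _ h), pvCol_pvSt _ _ _ h]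

lemma pvLen_pvSt4 (a : List (List Int)) (i1 i2 i3 i4 : Nat) (v1 v2 v3 v4 : Int) :
    (pvSt4 a i1 v1 i2 v2 i3 v3 i4 v4).length = a.length := by
  simp [pvSt4, pvLen_pvSt]

lemma pvRows4_pvAStep (a : List (List Int)) (m : String) (h : pvRows4 a) :
    pvRows4 (pvAStep a m) := by
  unfold pvAStep
  split_ifs <;> first
    | exact h
    | exact pvRows4_pvSt4 _ _ _ _ _ _ _ _ _ (pvRows4_pvSt4 _ _ _ _ _ _ _ _ _ h)

lemma pvLen_pvAStep (a : List (List Int)) (m : String) :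
    (pvAStep a m).length = a.length := by
  unfold pvAStep
  split_ifs <;> simp [pvLen_pvSt4]

lemma pvCol_pvAStep (a : List (List Int)) (m : String) (h : pvRows4 a) :
    pvCol (pvAStep a m) = pvColStep (pvCol a) m := by
  unfold pvAStep pvColStep pvKey?
  by_cases hL : PySem.Str.pyGet? m 0 = some 'L'
  · rw [if_pos hL, if_pos hL]
    by_cases hLL : m = "L"
    · rw [if_pos hLL, if_pos hLL]
      simp [pvTable, pvApplyPairs, pvG_col, pvCol_pvSt4, pvRows4_pvSt4, h]
    · rw [if_neg hLL, if_neg hLL]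
      simp [pvTable, pvApplyPairs, pvG_col, pvCol_pvSt4, pvRows4_pvSt4, h]
  · rw [if_neg hL, if_neg hL]
    by_cases hR : PySem.Str.pyGet? m 0 = some 'R'
    · rw [if_pos hR, if_pos hR]
      by_cases hRR : m = "R"
      · rw [if_pos hRR, if_pos hRR]
        simp [pvTable, pvApplyPairs, pvG_col, pvCol_pvSt4, pvRows4_pvSt4, h]
      · rw [if_neg hRR, if_neg hRR]
        simp [pvTable, pvApplyPairs, pvG_col, pvCol_pvSt4, pvRows4_pvSt4, h]
    · rw [if_neg hR, if_neg hR]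
      by_cases hU : m = "U2"
      · rw [if_pos hU, if_pos (show m = "U2" ∨ m = "D2" ∨ m = "F2" ∨ m = "B2" from Or.inl hU)]
        subst hU
        simp [pvTable, pvApplyPairs, pvG_col, pvCol_pvSt4, pvRows4_pvSt4, h]
      · rw [if_neg hU]
        by_cases hD : m = "D2"
        · rw [if_pos hD, if_pos (show m = "U2" ∨ m = "D2" ∨ m = "F2" ∨ m = "B2" from Or.inr (Or.inl hD))]
          subst hD
          simp [pvTable, pvApplyPairs, pvG_col, pvCol_pvSt4, pvRows4_pvSt4, h]
        · rw [if_neg hD]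
          by_cases hF : m = "F2"
          · rw [if_pos hF, if_pos (show m = "U2" ∨ m = "D2" ∨ m = "F2" ∨ m = "B2" from Or.inr (Or.inr (Or.inl hF)))]
            subst hF
            simp [pvTable, pvApplyPairs, pvG_col, pvCol_pvSt4, pvRows4_pvSt4, h]
          · rw [if_neg hF]
            by_cases hB : m = "B2"
            · rw [if_pos hB, if_pos (show m = "U2" ∨ m = "D2" ∨ m = "F2" ∨ m = "B2" from Or.inr (Or.inr (Or.inr hB)))]
              subst hB
              simp [pvTable, pvApplyPairs, pvG_col, pvCol_pvSt4, pvRows4_pvSt4, h]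
            · rw [if_neg hB, if_neg (show ¬(m = "U2" ∨ m = "D2" ∨ m = "F2" ∨ m = "B2") from by
                simp [hU, hD, hF, hB])]

lemma pvCol_foldA (ms : List String) (a : List (List Int)) (h : pvRows4 a) :
    pvCol (ms.foldl pvAStep a) = ms.foldl pvColStep (pvCol a) := by
  induction ms generalizing a with
  | nil => rfl
  | cons m t ih =>
    simp only [List.foldl_cons]
    rw [ih _ (pvRows4_pvAStep _ _ h), pvCol_pvAStep _ _ h]

lemma pvLen_foldA (ms : List String) (a : List (List Int)) :
    (ms.foldl pvAStep a).length = a.length := by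
  induction ms generalizing a with
  | nil => rfl
  | cons m t ih => simp only [List.foldl_cons]; rw [ih, pvLen_pvAStep]

-- getD of List.set
lemma pv_getD_set_eq (l : List Int) (i : Nat) (v : Int) (h : i < l.length) :
    (l.set i v).getD i 0 = v := by
  simp [List.getD, h]

lemma pv_getD_set_ne (l : List Int) (i j : Nat) (v : Int) (h : j ≠ i) :
    (l.set i v).getD j 0 = l.getD j 0 := by
  simp [List.getD, List.getElem?_set_ne (by omega : i ≠ j)]

lemma pv_ext_getD (l1 l2 : List Int) (hl : l1.length = l2.length)
    (h : ∀ j < l1.length, l1.getD j 0 = l2.getD j 0) : l1 = l2 := by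
  apply List.ext_getElem hl
  intro j h1 h2
  have hj := h j h1
  rwa [List.getD_eq_getElem _ _ h1, List.getD_eq_getElem _ _ h2] at hj

lemma pv_lookup_none (t : List (Nat × Nat)) (j : Nat) (h : j ∉ t.map Prod.fst) :
    t.lookup j = none := by
  induction t with
  | nil => rfl
  | cons p r ih =>
    obtain ⟨d, v⟩ := p
    simp only [List.map_cons, List.mem_cons, not_or] at h
    have hbf : (j == d) = false := beq_eq_false_iff_ne.mpr h.1
    simp [List.lookup, hbf, ih h.2]

lemma pv_lookup_mem (t : List (Nat × Nat)) (j s : Nat) (h : t.lookup j = some s) :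
    (j, s) ∈ t := by
  induction t with
  | nil => simp [List.lookup] at h
  | cons p r ih =>
    obtain ⟨d, v⟩ := p
    by_cases hj : j = d
    · subst hj
      have hbt : (j == j) = true := beq_self_eq_true j
      simp only [List.lookup, hbt] at h
      have hv : v = s := by injection h
      subst hv
      exact List.mem_cons_self
    · have hbf : (j == d) = false := beq_eq_false_iff_ne.mpr hj
      simp only [List.lookup, hbf] at h
      exact List.mem_cons_of_mem _ (ih h)

lemma pvLen_foldl_set (pairs : List (Nat × Nat)) (g : Nat × Nat → Int) (b : List Int) :
    (pairs.foldl (fun b p => b.set p.1 (g p)) b).length = b.length := by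
  induction pairs generalizing b with
  | nil => rfl
  | cons p t ih => simp only [List.foldl_cons]; rw [ih]; simp

lemma pvApplyPairs_getD (bits : List Int) (flip : Bool) (pairs : List (Nat × Nat))
    (b : List Int) (hlen : b.length = bits.length)
    (hd : ∀ p ∈ pairs, p.1 < bits.length) (hnd : (pairs.map Prod.fst).Nodup) (j : Nat) :
    (pairs.foldl (fun b p => b.set p.1 (if flip then 1 - bits.getD p.2 0 else bits.getD p.2 0)) b).getD j 0
      = match pairs.lookup j with
        | some s => (if flip then 1 - bits.getD s 0 else bits.getD s 0)
        | none => b.getD j 0 := by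
  induction pairs generalizing b with
  | nil => rfl
  | cons p t ih =>
    obtain ⟨d, s⟩ := p
    simp only [List.map_cons, List.nodup_cons] at hnd
    simp only [List.foldl_cons]
    rw [ih (b.set d _) (by simp [hlen])
        (fun q hq => hd q (List.mem_cons_of_mem _ hq)) hnd.2 ]
    by_cases hj : j = d
    · subst hj
      have hbt : (j == j) = true := beq_self_eq_true j
      have hjlt : j < b.length := by rw [hlen]; exact hd (j, s) (by simp)
      rw [pv_lookup_none t j hnd.1]
      simp only [List.lookup, hbt]
      exact pv_getD_set_eq _ _ _ hjlt
    · have hbf : (j == d) = false := beq_eq_false_iff_ne.mpr hj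
      cases hm : t.lookup j with
      | some s' => simp [List.lookup, hbf, hm]
      | none =>
        simp only [List.lookup, hbf, hm]
        exact pv_getD_set_ne _ _ _ _ hj

lemma pv_getD_range_map {α : Type} (f : Nat → α) (d : α) (j : Nat) (h : j < 20) :
    (((List.range 20).map f).getD j d) = f j := by
  simp [List.getD, List.getElem?_range, h]

lemma pvApply_getD (st : List Nat × List Bool) (bits : List Int) (j : Nat)
    (h : j < bits.length) : (pvApply st bits).getD j 0 = pvAct st bits j := by
  simp [pvApply, List.getD, h]

lemma pvApply_length (st : List Nat × List Bool) (bits : List Int) :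
    (pvApply st bits).length = bits.length := by simp [pvApply]

-- the action homomorphism for one composed key
lemma pvApply_compose_key (st : List Nat × List Bool) (bits : List Int)
    (pairs : List (Nat × Nat)) (flip : Bool) (req : Nat)
    (hreq : req ≤ bits.length) (hn : bits.length ≤ 20)
    (hnd : (pairs.map Prod.fst).Nodup)
    (hbnd : ∀ p ∈ pairs, p.1 < req ∧ p.2 < req) :
    pvApply ((List.range 20).map (fun d => st.1.getD (pvSrcOf pairs d) 0),
             (List.range 20).map (fun d =>
               ((if pvMemOf pairs d then flip else false)).xor (st.2.getD (pvSrcOf pairs d) false))) bits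
      = pvApplyPairs pairs flip (pvApply st bits) := by
  apply pv_ext_getD
  · simp [pvApply, pvApplyPairs, pvLen_foldl_set]
  · intro j hj
    rw [pvApply_length] at hj
    have hj20 : j < 20 := lt_of_lt_of_le hj hn
    rw [pvApply_getD _ _ _ hj,
        pvApplyPairs,
        pvApplyPairs_getD (pvApply st bits) flip pairs (pvApply st bits) rfl
          (fun p hp => by rw [pvApply_length]; exact lt_of_lt_of_le (hbnd p hp).1 hreq) hnd j]
    cases hm : pairs.lookup j with
    | some s =>
      have hmem : (j, s) ∈ pairs := pv_lookup_mem _ _ _ hm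
      have hs : s < bits.length := lt_of_lt_of_le (hbnd _ hmem).2 hreq
      simp only [pvAct, pvSrcOf, pvMemOf, hm, Option.getD_some, Option.isSome_some,
        pv_getD_range_map _ _ _ hj20, pvApply_getD _ _ _ hs, if_true]
      cases flip <;> cases hf : st.2.getD s false <;> simp [hf]
    | none =>
      simp only [pvAct, pvSrcOf, pvMemOf, hm, Option.getD_none, Option.isSome_none,
        pv_getD_range_map _ _ _ hj20, pvApply_getD _ _ _ hj, Bool.false_eq_true,
        if_false, Bool.false_xor]

-- every effective key's cycle indices are distinct targets below pvReq of its move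
lemma pv_key_spec (m k : String) (hk : pvKey? m = some k) :
    ((pvTable k).1.map Prod.fst).Nodup ∧ ∀ p ∈ (pvTable k).1, p.1 < pvReq m ∧ p.2 < pvReq m := by
  unfold pvKey? at hk
  split_ifs at hk with h1 h2 h3 h4 h5
  · have hr : pvReq m = 12 := by unfold pvReq; rw [if_pos h1]
    injection hk with hke; subst hke; rw [hr]; decide
  · have hr : pvReq m = 12 := by unfold pvReq; rw [if_pos h1]
    injection hk with hke; subst hke; rw [hr]; decide
  · have hr : pvReq m = 20 := by unfold pvReq; rw [if_neg h1, if_pos h3]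
    injection hk with hke; subst hke; rw [hr]; decide
  · have hr : pvReq m = 20 := by unfold pvReq; rw [if_neg h1, if_pos h3]
    injection hk with hke; subst hke; rw [hr]; decide
  · injection hk with hke
    subst hke
    rcases h5 with rfl | rfl | rfl | rfl <;> decide

lemma pvApply_compose (st : List Nat × List Bool) (bits : List Int) (m : String)
    (hreq : pvReq m ≤ bits.length) (hn : bits.length ≤ 20) :
    pvApply (pvCompose st m) bits = pvColStep (pvApply st bits) m := by
  unfold pvCompose pvColStep
  cases hk : pvKey? m with
  | none => rfl
  | some k =>
    obtain ⟨hnd, hbnd⟩ := pv_key_spec m k hk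
    exact pvApply_compose_key st bits (pvTable k).1 (pvTable k).2 (pvReq m) hreq hn hnd hbnd

lemma pvApply_fold (ms : List String) (st : List Nat × List Bool) (bits : List Int)
    (hreq : ∀ m ∈ ms, pvReq m ≤ bits.length) (hn : bits.length ≤ 20) :
    pvApply (ms.foldl pvCompose st) bits = ms.foldl pvColStep (pvApply st bits) := by
  induction ms generalizing st with
  | nil => rfl
  | cons m t ih =>
    simp only [List.foldl_cons]
    rw [ih (pvCompose st m) (fun q hq => hreq q (List.mem_cons_of_mem _ hq)),
        pvApply_compose st bits m (hreq m (by simp)) hn]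

lemma pvApply_init (bits : List Int) (hn : bits.length ≤ 20) :
    pvApply (List.range 20, List.replicate 20 false) bits = bits := by
  apply pv_ext_getD
  · simp [pvApply]
  · intro j hj
    rw [pvApply_length] at hj
    have hj20 : j < 20 := lt_of_lt_of_le hj hn
    rw [pvApply_getD _ _ _ hj]
    have h2 : (List.replicate 20 false).getD j false = false := by
      rcases Nat.lt_or_ge j 20 with h | h
      · rw [List.getD_eq_getElem _ _ (by simpa using h)]
        simp only [List.getElem_replicate]
      · rw [List.getD_eq_default _ _ (by simpa using h)]
    have h1 : (List.range 20).getD j 0 = j := by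
      rw [List.getD_eq_getElem _ _ (by simpa using hj20)]; simp
    simp only [pvAct]
    rw [show ((List.range 20, List.replicate 20 false) : List Nat × List Bool).2.getD j false = false from h2,
        show ((List.range 20, List.replicate 20 false) : List Nat × List Bool).1.getD j 0 = j from h1]
    simp

-- ===== parity sums =====
def pvSum (f : Nat → Int) : Nat → Int
  | 0 => 0
  | k + 1 => pvSum f k + f k

lemma pvSum_shift (f : Nat → Int) (k : Nat) :
    pvSum f (k + 1) = f 0 + pvSum (fun j => f (j + 1)) k := by
  induction k with
  | zero => simp [pvSum]
  | succ n ih => rw [show pvSum f (n+1+1) = pvSum f (n+1) + f (n+1) from rfl, ih]; simp [pvSum]; ring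

lemma pvSum_congr (f g : Nat → Int) (k : Nat) (h : ∀ j < k, f j = g j) :
    pvSum f k = pvSum g k := by
  induction k with
  | zero => rfl
  | succ n ih =>
    show pvSum f n + f n = pvSum g n + g n
    rw [ih (fun j hj => h j (Nat.lt_succ_of_lt hj)), h n (Nat.lt_succ_self n)]

lemma pvParA_eq (rows : List (List Int)) (acc : Int) (x : Nat) :
    pvParA acc x rows
      = acc + pvSum (fun j => (pvCol rows).getD j 0 * 2 ^ (19 - (x + j))) rows.length := by
  induction rows generalizing acc x with
  | nil => simp [pvParA, pvSum]
  | cons e t ih =>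
    rw [show pvParA acc x (e :: t) = pvParA (acc + e.getD 3 0 * 2 ^ (19 - x)) (x + 1) t from rfl,
        ih]
    rw [show (e :: t).length = t.length + 1 from rfl, pvSum_shift]
    have h0 : (pvCol (e :: t)).getD 0 0 = e.getD 3 0 := rfl
    have hsh : ∀ j, (pvCol (e :: t)).getD (j + 1) 0 = (pvCol t).getD j 0 := by
      intro j; rfl
    rw [h0]
    rw [pvSum_congr (fun j => (pvCol (e :: t)).getD (j + 1) 0 * 2 ^ (19 - (x + (j + 1))))
        (fun j => (pvCol t).getD j 0 * 2 ^ (19 - (x + 1 + j))) t.length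
        (fun j _ => by simp only [hsh j, show x + (j + 1) = x + 1 + j from by omega])]
    simp
    ring

-- the value Source B's parity loop reads at position i
def pvBval (arr : List (List Int)) (sigma : List Nat) (flips : List Bool) (i : Nat) : Int :=
  if flips.getD i false then 1 - (arr.getD (sigma.getD i 0) []).getD 3 0
  else (arr.getD (sigma.getD i 0) []).getD 3 0

lemma pvParB_eq (arr : List (List Int)) (sigma : List Nat) (flips : List Bool)
    (rest : List (List Int)) (acc : Int) (i : Nat) :
    pvParB arr sigma flips acc i rest
      = acc + pvSum (fun j => pvBval arr sigma flips (i + j) * 2 ^ (19 - (i + j))) rest.length := by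
  induction rest generalizing acc i with
  | nil => simp [pvParB, pvSum]
  | cons e t ih =>
    rw [show pvParB arr sigma flips acc i (e :: t)
        = pvParB arr sigma flips
            (acc + (if flips.getD i false
                    then 1 - (arr.getD (sigma.getD i 0) []).getD 3 0
                    else (arr.getD (sigma.getD i 0) []).getD 3 0) * 2 ^ (19 - i))
            (i + 1) t from by simp [pvParB], ih]
    rw [show (e :: t).length = t.length + 1 from rfl, pvSum_shift]
    rw [pvSum_congr (fun j => pvBval arr sigma flips (i + (j + 1)) * 2 ^ (19 - (i + (j + 1))))
        (fun j => pvBval arr sigma flips (i + 1 + j) * 2 ^ (19 - (i + 1 + j))) t.length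
        (fun j _ => by simp only [show i + (j + 1) = i + 1 + j from by omega])]
    simp [pvBval]
    ring

-- ===== VERDICT (by name: the statement is the Claim_ definition above) =====
theorem check_position_3_spec : Claim_equal_check_position_3 := by
  intro ms arr numb hdom hpre
  unfold Spec_check_position_3
  obtain ⟨hne, hlen, hrows, hreq⟩ := hpre
  simp only [check_position_3, check_position_3_alt]
  refine congrArg _ ?_
  have hcollen : (pvCol arr).length = arr.length := by simp [pvCol]
  have hreq' : ∀ m ∈ ms, pvReq m ≤ (pvCol arr).length := by
    intro m hm; rw [hcollen]; exact hreq m hm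
  have hn : (pvCol arr).length ≤ 20 := by rw [hcollen]; exact hlen
  have hfold : pvCol (ms.foldl pvAStep arr)
      = pvApply (ms.foldl pvCompose (List.range 20, List.replicate 20 false)) (pvCol arr) := by
    rw [pvCol_foldA ms arr hrows, pvApply_fold ms _ _ hreq' hn, pvApply_init _ hn]
  rw [pvParA_eq, pvParB_eq, hfold, pvLen_foldA ms arr]
  congr 1
  apply pvSum_congr
  intro j hj
  rw [pvApply_getD _ (pvCol arr) j (by rw [hcollen]; exact hj)]
  simp only [pvAct, pvBval, Nat.zero_add]
  rw [show ((arr.getD (((ms.foldl pvCompose (List.range 20, List.replicate 20 false)).1).getD j 0) []).getD 3 0)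
      = (pvCol arr).getD (((ms.foldl pvCompose (List.range 20, List.replicate 20 false)).1).getD j 0) 0
      from pvG_col arr _]
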